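-- pv_equiv track=rewrite | github.com/ulkumeteriz/AcousticType | src/keystroke_detection.py | anything_in_between
-- ===== SOURCE A (Python) =====
-- def anything_in_between(l, lower_limit, upper_limit):
--     count = 0
--     # l is sorted.
--     for value in l:
--         if value > lower_limit and value < upper_limit:
--             count += 1
--         if value > upper_limit:
--             return count
--     return 0
-- ===== SOURCE B (Python) =====
-- def anything_in_between(l, lower_limit, upper_limit):
--     # Two-phase: locate the first element exceeding upper_limit, then count
--     # the qualifying values in the prefix before it; 0 if no element exceeds.
--     for i, v in enumerate(l):
--         if v > upper_limit:
--             return sum(1 for x in l[:i] if lower_limit < x < upper_limit)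
--     return 0
-- ===== Notes on version B (the rewrite author's own statement) =====
-- stated objective: alternative
-- what changed: B splits the single accumulating scan of A into two phases: find the index of the first element strictly greater than upper_limit (returning 0 if none), then count elements of that prefix strictly between the limits.
import Mathlib
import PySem

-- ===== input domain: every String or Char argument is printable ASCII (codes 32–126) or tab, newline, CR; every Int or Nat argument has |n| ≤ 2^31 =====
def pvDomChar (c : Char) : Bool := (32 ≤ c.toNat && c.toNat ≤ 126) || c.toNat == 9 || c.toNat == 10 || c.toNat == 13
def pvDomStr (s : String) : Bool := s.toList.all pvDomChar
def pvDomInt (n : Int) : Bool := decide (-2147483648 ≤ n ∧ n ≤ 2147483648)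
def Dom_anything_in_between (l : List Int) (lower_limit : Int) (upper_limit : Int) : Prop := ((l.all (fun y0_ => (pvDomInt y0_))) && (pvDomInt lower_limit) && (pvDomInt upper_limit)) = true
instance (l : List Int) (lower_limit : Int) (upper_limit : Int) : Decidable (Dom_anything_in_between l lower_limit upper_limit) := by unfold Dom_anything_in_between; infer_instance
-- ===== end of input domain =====

-- B re-implements anything_in_between as two phases (find first value > upper_limit, then count the prefix strictly between the limits) instead of A's single accumulating scan; objective: alternative decomposition, same cost.
-- ===== PORT A =====
-- A: one scan with an accumulator; early return of count at the first value > upper_limit, else 0.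
def pvAGo (lower_limit upper_limit : Int) : List Int → Int → Int
  | [], _ => 0
  | v :: rest, count =>
    let count' := if v > lower_limit ∧ v < upper_limit then count + 1 else count
    if v > upper_limit then count' else pvAGo lower_limit upper_limit rest count'

def anything_in_between (l : List Int) (lower_limit : Int) (upper_limit : Int) : Int :=
  pvAGo lower_limit upper_limit l 0

-- ===== PORT B =====
-- B: find the first index whose value exceeds upper_limit, then count in that prefix.
def anything_in_between_alt (l : List Int) (lower_limit : Int) (upper_limit : Int) : Int :=
  match l.findIdx? (fun v => v > upper_limit) with
  | none => 0
  | some i => ((l.take i).filter (fun x => lower_limit < x ∧ x < upper_limit)).length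

-- ===== PRECONDITION & SPEC =====
def Spec_anything_in_between (l : List Int) (lower_limit : Int) (upper_limit : Int) (out : Int) : Prop := out = anything_in_between_alt l lower_limit upper_limit
instance (l : List Int) (lower_limit : Int) (upper_limit : Int) (out : Int) : Decidable (Spec_anything_in_between l lower_limit upper_limit out) := by unfold Spec_anything_in_between; infer_instance

-- ===== CLAIM (what is proved, stated in full; the proofs are below) =====
def Claim_equal_anything_in_between : Prop := ∀ (l : List Int) (lower_limit : Int) (upper_limit : Int), Dom_anything_in_between l lower_limit upper_limit → Spec_anything_in_between l lower_limit upper_limit (anything_in_between l lower_limit upper_limit)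

-- ===== LEMMAS AND PROOFS =====

-- ===== VERDICT (by name: the statement is the Claim_ definition above) =====
theorem pvAGo_eq (lower_limit upper_limit : Int) :
    ∀ (l : List Int) (c : Int),
      pvAGo lower_limit upper_limit l c =
        match l.findIdx? (fun v => v > upper_limit) with
        | none => 0
        | some i => c + ((l.take i).filter (fun x => lower_limit < x ∧ x < upper_limit)).length := by
  intro l
  induction l with
  | nil => intro c; rfl
  | cons v rest ih =>
    intro c
    by_cases hu : v > upper_limit
    · have hnot : ¬ (v > lower_limit ∧ v < upper_limit) := by
        intro h; omega
      simp [pvAGo, List.findIdx?_cons, hu, hnot]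
    · have h2 : (decide (v > upper_limit)) = false := by
        simp [hu]
      by_cases hl : v > lower_limit ∧ v < upper_limit
      · simp only [pvAGo, if_pos hl, if_neg hu, ih, List.findIdx?_cons, h2]
        cases hfind : rest.findIdx? (fun v => v > upper_limit) with
        | none => simp
        | some i =>
          simp [List.take_succ_cons, hl]
          ring
      · simp only [pvAGo, if_neg hl, if_neg hu, ih, List.findIdx?_cons, h2]
        cases hfind : rest.findIdx? (fun v => v > upper_limit) with
        | none => simp
        | some i =>
          simp [List.take_succ_cons, hl]

theorem anything_in_between_spec : Claim_equal_anything_in_between := by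
  intro l lower_limit upper_limit _
  unfold Spec_anything_in_between anything_in_between anything_in_between_alt
  rw [pvAGo_eq]
  cases l.findIdx? (fun v => v > upper_limit) <;> simp
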